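-- pv_equiv track=rewrite | github.com/RushabhShah20/leetcode-solutions | medium/Strictly Palindromic Number/Python/main.py | nInary
-- ===== SOURCE A (Python) =====
-- def nInary(n: int, base: int):
--     result: int = 0
--     mul: int = 1
--     while n > 0:
--         result += (n % base) * mul
--         n //= base
--         mul *= 10
--     return result
-- ===== SOURCE B (Python) =====
-- def nInary(n: int, base: int):
--     if n <= 0:
--         return 0
--     p = 1
--     while p * base <= n:
--         p *= base
--     result = 0
--     while p > 0:
--         result = result * 10 + (n // p) % base
--         p //= base
--     return result
-- ===== Notes on version B (the rewrite author's own statement) =====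
-- stated objective: alternative
-- what changed: B walks the digits most-significant-first: it first finds the highest power of the base not exceeding n, then builds the packed decimal by Horner accumulation result*10+digit, instead of A's least-significant-first loop with a decimal multiplier.
-- outside the precondition, e.g. on nInary(5, -2): A returns -1, B returns 0
import Mathlib
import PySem

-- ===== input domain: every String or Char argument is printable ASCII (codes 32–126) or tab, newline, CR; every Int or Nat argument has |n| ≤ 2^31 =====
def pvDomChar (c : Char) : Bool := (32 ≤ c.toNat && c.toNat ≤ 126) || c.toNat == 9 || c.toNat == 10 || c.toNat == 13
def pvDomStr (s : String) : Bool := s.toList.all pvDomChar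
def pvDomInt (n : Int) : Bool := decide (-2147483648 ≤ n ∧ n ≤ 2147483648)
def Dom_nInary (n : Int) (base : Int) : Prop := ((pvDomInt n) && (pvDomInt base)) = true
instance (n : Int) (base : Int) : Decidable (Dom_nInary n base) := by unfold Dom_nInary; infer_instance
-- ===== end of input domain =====

-- B rewrites A's least-significant-first digit loop as a most-significant-first Horner accumulation
-- over a precomputed highest power of the base (objective: alternative decomposition, same cost).

-- ===== PORT A =====
-- A's while-loop; the fuel argument only makes the recursion total, n.toNat + 1 steps always
-- suffice on Pre_ (n strictly decreases each iteration when base ≥ 2).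
def nInaryLoop (fuel : Nat) (n base result mul : Int) : Int :=
  match fuel with
  | 0 => result
  | f + 1 =>
      if 0 < n then
        nInaryLoop f (PySem.Int.floordiv n base) base
          (result + PySem.Int.mod n base * mul) (mul * 10)
      else result

def nInary (n : Int) (base : Int) : Int := nInaryLoop (n.toNat + 1) n base 0 1

-- ===== PORT B =====
-- B's first while-loop: grow p by factors of base while p * base ≤ n (fuel for totality only).
def nInaryPowLoop (fuel : Nat) (n base p : Int) : Int :=
  match fuel with
  | 0 => p
  | f + 1 => if p * base ≤ n then nInaryPowLoop f n base (p * base) else p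

-- B's second while-loop: Horner accumulation result * 10 + (n // p) % base, p //= base.
def nInaryHornLoop (fuel : Nat) (n base p result : Int) : Int :=
  match fuel with
  | 0 => result
  | f + 1 =>
      if 0 < p then
        nInaryHornLoop f n base (PySem.Int.floordiv p base)
          (result * 10 + PySem.Int.mod (PySem.Int.floordiv n p) base)
      else result

def nInary_alt (n : Int) (base : Int) : Int :=
  if n ≤ 0 then 0
  else nInaryHornLoop (n.toNat + 1) n base (nInaryPowLoop (n.toNat + 1) n base 1) 0

-- ===== PRECONDITION & SPEC =====
-- Pre_ excludes n > 0 with base < 2: there A raises ZeroDivisionError (base = 0) or loops forever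
-- (base = 1), and a negative base is a malformed argument for a base-conversion task.
def Pre_nInary (n : Int) (base : Int) : Prop := n ≤ 0 ∨ 2 ≤ base
instance (n : Int) (base : Int) : Decidable (Pre_nInary n base) := by
  unfold Pre_nInary; infer_instance

def pvWitness_nInary : Int × Int := (10, 2)

def Spec_nInary (n : Int) (base : Int) (out : Int) : Prop := out = nInary_alt n base
instance (n : Int) (base : Int) (out : Int) : Decidable (Spec_nInary n base out) := by
  unfold Spec_nInary; infer_instance

-- ===== CLAIM (what is proved, stated in full; the proofs are below) =====
def Claim_equal_nInary : Prop :=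
  ∀ (n : Int) (base : Int), Dom_nInary n base → Pre_nInary n base →
    Spec_nInary n base (nInary n base)

-- ===== LEMMAS AND PROOFS =====

-- The packed-decimal value of the k+1 lowest base-digits of n (proof-only helper).
def packVal (base : Int) : Nat → Int → Int
  | 0, n => n % base
  | k + 1, n => n % base + 10 * packVal base k (n / base)

theorem packVal_zero (base : Int) (k : Nat) : packVal base k 0 = 0 := by
  induction k with
  | zero => simp [packVal]
  | succ k ih => simp [packVal, ih]

theorem floordiv_eq (a b : Int) (hb : 2 ≤ b) : PySem.Int.floordiv a b = a / b :=
  PySem.Int.floordiv_eq_ediv_of_pos (by omega)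

theorem mod_eq (a b : Int) (hb : 2 ≤ b) : PySem.Int.mod a b = a % b :=
  PySem.Int.mod_eq_emod_of_pos (by omega)

theorem nInaryLoop_eq (base : Int) (hb : 2 ≤ base) :
    ∀ (f : Nat) (k : Nat) (n r m : Int), 0 ≤ n → n.toNat < f → n < base ^ (k + 1) →
      nInaryLoop f n base r m = r + m * packVal base k n := by
  intro f
  induction f with
  | zero => intro k n r m _ hf _; omega
  | succ f ih =>
    intro k n r m hn hf hk
    by_cases hpos : 0 < n
    · have hdivlt : n / base < n := by
        rw [Int.ediv_lt_iff_lt_mul (by omega)]; nlinarith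
      have hdivnn : 0 ≤ n / base := Int.ediv_nonneg hn (by omega)
      simp only [nInaryLoop, if_pos hpos, floordiv_eq _ _ hb, mod_eq _ _ hb]
      cases k with
      | zero =>
        have hz : n / base = 0 := Int.ediv_eq_zero_of_lt hn (by simpa using hk)
        rw [hz, ih 0 0 _ _ (le_refl 0) (by omega) (by positivity)]
        simp [packVal]; ring
      | succ k =>
        have hklt : n / base < base ^ (k + 1) := by
          rw [Int.ediv_lt_iff_lt_mul (by omega)]
          calc n < base ^ (k + 2) := hk
            _ = base ^ (k + 1) * base := by ring
        rw [ih k (n / base) _ _ hdivnn (by omega) hklt]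
        simp [packVal]; ring
    · have hz : n = 0 := by omega
      simp [nInaryLoop, hz, packVal_zero]

theorem packVal_split (base : Int) (hb : 2 ≤ base) :
    ∀ (k : Nat) (n : Int), 0 ≤ n →
      packVal base (k + 1) n = packVal base k n + n / base ^ (k + 1) % base * 10 ^ (k + 1) := by
  intro k
  induction k with
  | zero => intro n _; simp [packVal]; ring
  | succ k ih =>
    intro n hn
    have hdivnn : 0 ≤ n / base := Int.ediv_nonneg hn (by omega)
    have hdd : n / base / base ^ (k + 1) = n / base ^ (k + 2) := by
      rw [Int.ediv_ediv_of_nonneg (by omega)]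
      congr 1; ring
    calc packVal base (k + 2) n
        = n % base + 10 * packVal base (k + 1) (n / base) := rfl
      _ = n % base + 10 * (packVal base k (n / base)
            + n / base / base ^ (k + 1) % base * 10 ^ (k + 1)) := by rw [ih _ hdivnn]
      _ = packVal base (k + 1) n + n / base ^ (k + 2) % base * 10 ^ (k + 2) := by
            rw [hdd]; simp [packVal]; ring

theorem nInaryHornLoop_zero (f : Nat) (n base r : Int) :
    nInaryHornLoop f n base 0 r = r := by
  cases f <;> simp [nInaryHornLoop]

theorem nInaryHornLoop_eq (n base : Int) (hb : 2 ≤ base) (hn : 0 ≤ n) :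
    ∀ (k : Nat) (f : Nat) (r : Int), k < f →
      nInaryHornLoop f n base (base ^ k) r = r * 10 ^ (k + 1) + packVal base k n := by
  intro k
  induction k with
  | zero =>
    intro f r hf
    obtain ⟨f, rfl⟩ : ∃ g, f = g + 1 := ⟨f - 1, by omega⟩
    have h1b : PySem.Int.floordiv 1 base = 0 := by
      rw [floordiv_eq _ _ hb]; exact Int.ediv_eq_zero_of_lt (by omega) (by omega)
    simp only [nInaryHornLoop, pow_zero, if_pos (by omega : (0:Int) < 1), h1b,
      mod_eq _ _ hb, nInaryHornLoop_zero]
    simp [packVal]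
  | succ k ih =>
    intro f r hf
    obtain ⟨f, rfl⟩ : ∃ g, f = g + 1 := ⟨f - 1, by omega⟩
    have hppos : (0:Int) < base ^ (k + 1) := by positivity
    have hpb : PySem.Int.floordiv (base ^ (k + 1)) base = base ^ k := by
      rw [floordiv_eq _ _ hb, pow_succ, Int.mul_ediv_cancel _ (by omega)]
    have hfd : PySem.Int.floordiv n (base ^ (k + 1)) = n / base ^ (k + 1) :=
      PySem.Int.floordiv_eq_ediv_of_pos hppos
    simp only [nInaryHornLoop, if_pos hppos, hpb, hfd, mod_eq _ _ hb]
    rw [ih f _ (by omega), packVal_split base hb k n hn]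
    ring

theorem nInaryPowLoop_eq (n base : Int) (hb : 2 ≤ base) :
    ∀ (f : Nat) (p : Int), 0 < p → p ≤ n → (n - p).toNat < f →
      ∃ k : Nat, nInaryPowLoop f n base p = p * base ^ k ∧
        p * base ^ k ≤ n ∧ n < p * base ^ (k + 1) := by
  intro f
  induction f with
  | zero => intro p _ hpn hf; omega
  | succ f ih =>
    intro p hp hpn hf
    by_cases hstep : p * base ≤ n
    · have hgrow : p + 1 ≤ p * base := by nlinarith
      obtain ⟨k, hval, hlo, hhi⟩ :=
        ih (p * base) (by positivity) hstep (by omega)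
      refine ⟨k + 1, ?_, ?_, ?_⟩
      · simp only [nInaryPowLoop, if_pos hstep, hval]; ring
      · calc p * base ^ (k + 1) = p * base * base ^ k := by ring
          _ ≤ n := hlo
      · calc n < p * base * base ^ (k + 1) := hhi
          _ = p * base ^ (k + 2) := by ring
    · exact ⟨0, by simp [nInaryPowLoop, hstep], by simpa using hpn,
        by simpa using lt_of_not_ge hstep⟩

-- ===== VERDICT (by name: the statement is the Claim_ definition above) =====
theorem nInary_spec : Claim_equal_nInary := by
  intro n base _ hpre
  unfold Spec_nInary
  by_cases hn : n ≤ 0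
  · have ht : n.toNat = 0 := by omega
    simp [nInary, nInary_alt, ht, nInaryLoop, hn]
  · have hpos : 0 < n := by omega
    have hb : 2 ≤ base := by rcases hpre with h | h; omega; exact h
    obtain ⟨k, hval, hlo, hhi⟩ :=
      nInaryPowLoop_eq n base hb (n.toNat + 1) 1 one_pos (by omega) (by omega)
    rw [one_mul] at hval hlo hhi
    have h2k : (2:Int) ^ k ≤ base ^ k := pow_le_pow_left₀ (by omega) (by omega) k
    have hk2 : (k:Int) < 2 ^ k := by exact_mod_cast Nat.lt_two_pow_self
    have hkf : k < n.toNat + 1 := by omega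
    unfold nInary nInary_alt
    rw [if_neg hn, hval,
      nInaryHornLoop_eq n base hb (by omega) k (n.toNat + 1) 0 hkf,
      nInaryLoop_eq base hb (n.toNat + 1) k n 0 1 (by omega) (by omega) hhi]
    ring
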